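-- pv_equiv track=rewrite | github.com/anasalawa/Python | Programs/asn4.py | flexEater
-- ===== SOURCE A (Python) =====
-- def flexEater(foodweb):
-- 	flexible = []
-- 	counts = {}
-- 	for pred in foodweb.keys():
-- 			counts[pred] = [len(foodweb[pred])]
-- 	freq = max(counts.values())
-- 	for pred in counts.keys():
-- 		if counts[pred] == freq:
-- 			flexible.append(pred)
--
-- 	return flexible
-- ===== SOURCE B (Python) =====
-- def flexEater(foodweb):
--     best = None
--     winners = []
--     for pred, prey in foodweb.items():
--         c = len(prey)
--         if best is None or c > best:
--             best, winners = c, [pred]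
--         elif c == best:
--             winners.append(pred)
--     return winners
-- ===== Notes on version B (the rewrite author's own statement) =====
-- stated objective: alternative
-- what changed: B replaces A's predator-to-count table, max over values and second filtering pass by a single running-maximum scan that keeps the current best prey count and the list of predators attaining it, resetting on a strictly larger count.
import Mathlib
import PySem

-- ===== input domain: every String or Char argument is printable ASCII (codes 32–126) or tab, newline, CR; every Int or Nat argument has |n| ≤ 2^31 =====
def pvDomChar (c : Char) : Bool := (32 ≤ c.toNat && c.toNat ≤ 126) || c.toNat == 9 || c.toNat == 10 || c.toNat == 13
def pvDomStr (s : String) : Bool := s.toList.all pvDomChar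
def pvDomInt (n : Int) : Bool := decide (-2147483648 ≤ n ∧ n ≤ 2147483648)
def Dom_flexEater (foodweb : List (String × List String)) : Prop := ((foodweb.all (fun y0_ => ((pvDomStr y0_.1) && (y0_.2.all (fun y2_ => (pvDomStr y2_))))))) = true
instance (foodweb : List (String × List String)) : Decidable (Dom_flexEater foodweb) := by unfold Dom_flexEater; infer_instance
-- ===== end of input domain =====

-- B replaces A's count table + max over values + second filtering pass by a single running-maximum scan (alternative decomposition, same cost).

-- ===== PORT A =====
-- A stores counts[pred] = [len(...)], a singleton list; max/== on singleton lists coincide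
-- with max/== on the wrapped ints, so the port stores the int itself — exact here.
def flexEater (foodweb : List (String × List String)) : List String :=
  let d := PySem.Dict.ofList foodweb
  let counts : PySem.Dict String Int :=
    d.keys.foldl (fun c pred => c.insert pred ((d.getD pred []).length : Int)) PySem.Dict.empty
  match PySem.List.max? counts.values (fun x => x) with
  | none => []   -- Python raises ValueError here (empty foodweb); excluded by Pre_flexEater
  | some freq =>
    counts.keys.foldl (fun fl pred => if counts.getD pred 0 == freq then fl ++ [pred] else fl) []

-- ===== PORT B =====
-- the loop body of B: state = (best : Option Int, winners); reset on a strictly larger count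
def pvStepB (st : Option Int × List String) (item : String × List String) : Option Int × List String :=
  let c : Int := item.2.length
  match st.1 with
  | none => (some c, [item.1])
  | some b =>
    if c > b then (some c, [item.1])
    else if c == b then (some b, st.2 ++ [item.1])
    else st

def flexEater_alt (foodweb : List (String × List String)) : List String :=
  (((PySem.Dict.ofList foodweb).items.foldl pvStepB ((none : Option Int), ([] : List String)))).2

-- ===== PRECONDITION & SPEC =====
-- Python A raises ValueError (max of an empty sequence) exactly when foodweb is empty.
def Pre_flexEater (foodweb : List (String × List String)) : Prop := foodweb ≠ []
instance (foodweb : List (String × List String)) : Decidable (Pre_flexEater foodweb) := by unfold Pre_flexEater; infer_instance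
def pvWitness_flexEater : (List (String × List String)) := [("wolf", ["deer", "hare"]), ("fox", ["hare"])]

def Spec_flexEater (foodweb : List (String × List String)) (out : List String) : Prop := out = flexEater_alt foodweb
instance (foodweb : List (String × List String)) (out : List String) : Decidable (Spec_flexEater foodweb out) := by unfold Spec_flexEater; infer_instance

-- ===== CLAIM (what is proved, stated in full; the proofs are below) =====
def Claim_equal_flexEater : Prop := ∀ (foodweb : List (String × List String)), Dom_flexEater foodweb → Pre_flexEater foodweb → Spec_flexEater foodweb (flexEater foodweb)

-- ===== LEMMAS AND PROOFS =====

-- prey count of an item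
def pvCnt (q : String × List String) : Int := (q.2.length : Int)

lemma pv_contains_foldl_insert (t : List (String × List String))
    (d : PySem.Dict String (List String)) (k : String) (h : d.contains k = true) :
    (t.foldl (fun acc p => acc.insert p.1 p.2) d).contains k = true := by
  induction t generalizing d with
  | nil => exact h
  | cons a t ih =>
      exact ih _ (by rw [PySem.Dict.contains_insert]; simp [h])

lemma pv_keys_ofList_ne_nil (a : String × List String) (t : List (String × List String)) :
    (PySem.Dict.ofList (a :: t)).keys ≠ [] := by
  have hc : (PySem.Dict.ofList (a :: t)).contains a.1 = true := by
    show (t.foldl (fun acc p => acc.insert p.1 p.2) (PySem.Dict.empty.insert a.1 a.2)).contains a.1 = true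
    exact pv_contains_foldl_insert _ _ _ (by rw [PySem.Dict.contains_insert]; simp)
  intro hk
  rw [PySem.Dict.contains_iff_mem_keys, hk] at hc
  simp at hc

lemma pv_counts_items (f : String → Int) :
    ∀ (ks : List String) (c : PySem.Dict String Int), ks.Nodup →
      (∀ p ∈ ks, c.contains p = false) →
      (ks.foldl (fun c pred => c.insert pred (f pred)) c).items
        = c.items ++ ks.map (fun p => (p, f p)) := by
  intro ks
  induction ks with
  | nil => intro c _ _; simp
  | cons p ks ih =>
      intro c hnd hdis
      have hcp : c.contains p = false := hdis p (by simp)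
      have hdis' : ∀ q ∈ ks, (c.insert p (f p)).contains q = false := by
        intro q hq
        rw [PySem.Dict.contains_insert]
        have hqp : q ≠ p := fun h => (List.nodup_cons.mp hnd).1 (h ▸ hq)
        simp [hqp, hdis q (by simp [hq])]
      have := ih (c.insert p (f p)) (List.nodup_cons.mp hnd).2 hdis'
      simp only [List.foldl_cons, this, PySem.Dict.items_insert_of_not_contains c (f p) hcp]
      simp

lemma pvStepB_some (b : Int) (w : List String) (q : String × List String) :
    pvStepB (some b, w) q
      = if b < pvCnt q then (some (pvCnt q), [q.1])
        else if pvCnt q = b then (some b, w ++ [q.1]) else (some b, w) := by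
  simp only [pvStepB, pvCnt]
  split_ifs with h1 h2 h3 h4 <;> simp_all

-- running-max invariant of B's loop
lemma pv_runB : ∀ (l : List (String × List String)) (b : Int) (w : List String),
    l.foldl pvStepB (some b, w)
      = (some (l.foldl (fun m q => max m (pvCnt q)) b),
         (if l.foldl (fun m q => max m (pvCnt q)) b = b then w else [])
           ++ (l.filter (fun q => pvCnt q == l.foldl (fun m q => max m (pvCnt q)) b)).map Prod.fst) := by
  intro l
  induction l with
  | nil => intro b w; simp
  | cons q t ih =>
      intro b w
      have hle : ∀ (a : Int), a ≤ t.foldl (fun m r => max m (pvCnt r)) a := by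
        intro a
        exact (PySem.List.le_foldl_max_int t pvCnt a).1
      rcases lt_trichotomy (pvCnt q) b with hlt | heq | hgt
      · -- c < b : state unchanged
        have hM : (q :: t).foldl (fun m r => max m (pvCnt r)) b
            = t.foldl (fun m r => max m (pvCnt r)) b := by
          simp [max_eq_left hlt.le]
        have hstep : pvStepB (some b, w) q = (some b, w) := by
          rw [pvStepB_some, if_neg (by omega), if_neg (by omega)]
        have hq : (pvCnt q == t.foldl (fun m r => max m (pvCnt r)) b) = false := by
          have := hle b; simp only [beq_eq_false_iff_ne]; omega
        simp only [List.foldl_cons, hstep, ih b w, hM, List.filter_cons, hq]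
        simp
      · -- c = b : append
        have hM : (q :: t).foldl (fun m r => max m (pvCnt r)) b
            = t.foldl (fun m r => max m (pvCnt r)) b := by
          simp [heq]
        have hstep : pvStepB (some b, w) q = (some b, w ++ [q.1]) := by
          rw [pvStepB_some, if_neg (by omega), if_pos heq]
        set M := t.foldl (fun m r => max m (pvCnt r)) b with hMdef
        have hbM : b ≤ M := hle b
        simp only [List.foldl_cons, hstep, ih b (w ++ [q.1]), hM, List.filter_cons]
        by_cases hMb : M = b
        · simp [← hMdef, hMb, heq]
        · have : (pvCnt q == M) = false := by simp only [beq_eq_false_iff_ne]; omega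
          simp [← hMdef, hMb, this]
      · -- c > b : reset
        have hM : (q :: t).foldl (fun m r => max m (pvCnt r)) b
            = t.foldl (fun m r => max m (pvCnt r)) (pvCnt q) := by
          simp [max_eq_right hgt.le]
        have hstep : pvStepB (some b, w) q = (some (pvCnt q), [q.1]) := by
          rw [pvStepB_some, if_pos hgt]
        set M := t.foldl (fun m r => max m (pvCnt r)) (pvCnt q) with hMdef
        have hcM : pvCnt q ≤ M := hle (pvCnt q)
        have hMnb : M ≠ b := by omega
        simp only [List.foldl_cons, hstep, ih (pvCnt q) [q.1], hM, List.filter_cons, ← hMdef,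
          if_neg hMnb]
        by_cases hMc : M = pvCnt q
        · simp [hMc]
        · have : (pvCnt q == M) = false := by simp only [beq_eq_false_iff_ne]; omega
          simp [hMc, this]

-- ===== VERDICT (by name: the statement is the Claim_ definition above) =====
theorem flexEater_spec : Claim_equal_flexEater := by
  intro fw _ hpre
  obtain ⟨a, t0, rfl⟩ := List.exists_cons_of_ne_nil hpre
  show flexEater (a :: t0) = flexEater_alt (a :: t0)
  simp only [flexEater, flexEater_alt]
  set d := PySem.Dict.ofList (a :: t0) with hd
  set f : String → Int := fun p => ((d.getD p []).length : Int) with hf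
  set ks := d.keys with hks
  have hnd : ks.Nodup := PySem.Dict.nodup_keys_ofList _
  have hkne : ks ≠ [] := pv_keys_ofList_ne_nil a t0
  set counts := ks.foldl (fun c pred => c.insert pred (f pred)) PySem.Dict.empty with hcounts
  have hitems : counts.items = ks.map (fun p => (p, f p)) := by
    have := pv_counts_items f ks PySem.Dict.empty hnd (fun p _ => by simp)
    simpa [hcounts] using this
  have hval : counts.values = ks.map f := by
    simp only [PySem.Dict.values, hitems, List.map_map]
    rfl
  have hkeys : counts.keys = ks := by
    simp [PySem.Dict.keys, hitems, List.map_map, Function.comp_def]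
  -- d.items is nonempty; its key list is ks and its counts agree with f on members
  have hks_items : ks = d.items.map Prod.fst := rfl
  have hfc : ∀ r ∈ d.items, f r.1 = pvCnt r := by
    intro r hr
    have : d.getD r.1 [] = r.2 := by
      have : (r.1, r.2) ∈ d.items := hr
      exact PySem.Dict.getD_of_mem_items d this (hnd) []
    simp [hf, pvCnt, this]
  obtain ⟨q, ti, hqt⟩ : ∃ q ti, d.items = q :: ti := by
    cases h : d.items with
    | nil => exact absurd (by rw [hks_items, h]; rfl) hkne
    | cons q ti => exact ⟨q, ti, rfl⟩
  -- the common maximum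
  set M := ti.foldl (fun m r => max m (pvCnt r)) (pvCnt q) with hM
  have hmapf : ks.map f = d.items.map pvCnt := by
    rw [hks_items, List.map_map]
    exact List.map_congr_left hfc
  have hfreq : PySem.List.max? (ks.map f) (fun x => x) = some M := by
    rw [hmapf, hqt, List.map_cons, PySem.List.max?_id_cons]
    congr 1
    rw [List.foldl_map]
  rw [hval, hfreq]
  show counts.keys.foldl (fun fl pred => if counts.getD pred 0 == M then fl ++ [pred] else fl) []
      = (d.items.foldl pvStepB ((none : Option Int), ([] : List String))).2
  -- A's second pass is a filter over ks = map fst of a filter over items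
  have hA : ks.foldl (fun fl pred => if counts.getD pred 0 == M then fl ++ [pred] else fl) []
      = (d.items.filter (fun r => pvCnt r == M)).map Prod.fst := by
    rw [PySem.List.foldl_append_if_eq_filter (fun pred => counts.getD pred 0 == M) ks []]
    simp only [List.nil_append]
    have h1 : ks.filter (fun p => counts.getD p 0 == M) = ks.filter (fun p => f p == M) := by
      apply List.filter_congr
      intro p hp
      have hmem : (p, f p) ∈ counts.items := by
        rw [hitems]; exact List.mem_map_of_mem hp
      rw [PySem.Dict.getD_of_mem_items counts hmem (hkeys ▸ hnd) 0]
    rw [h1, hks_items, List.filter_map]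
    congr 1
    apply List.filter_congr
    intro r hr
    simp [Function.comp, hfc r hr]
  -- B's scan yields the same filter
  have hB : (d.items.foldl pvStepB ((none : Option Int), ([] : List String))).2
      = (d.items.filter (fun r => pvCnt r == M)).map Prod.fst := by
    rw [hqt]
    have hstep0 : pvStepB (none, []) q = (some (pvCnt q), [q.1]) := by
      simp [pvStepB, pvCnt]
    simp only [List.foldl_cons, hstep0, pv_runB ti (pvCnt q) [q.1], ← hM, List.filter_cons]
    have hcM : pvCnt q ≤ M := (PySem.List.le_foldl_max_int ti pvCnt (pvCnt q)).1
    by_cases hMc : M = pvCnt q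
    · simp [hMc]
    · have : (pvCnt q == M) = false := by simp only [beq_eq_false_iff_ne]; omega
      simp [hMc, this]
  rw [hkeys, hA, hB]
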